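/- GENERATED by mk_final_copies.py from the proof of the farm's unit `decode_residue.4b` (farm:decode_residue.4b.1: Proof.lean) as the
   re-elaboration sweep compiled it — do not edit. -/
import Vorbis.Spec.Units.decode_residue_4b
import Vorbis.Spec.Worked.decode_residue_4b_Lemmas

open X86 X86.User Asan Vorbis Vorbis.Spec Vorbis.Spec.DecodeResidue

/-- Unit `decode_residue.4b`: the call arm of the i-loop 2183 (0x10f141 … 0x10f1a3 + 0x10f290 … 0x10f297), as the two walks of
Lemmas.lean: `call_walk` (the entry `at_10f141` to `cut13`, the return address of the call of
codebook_decode_deinterleave_repeat: one check site, the call's precondition `deint_pre`, COMMON over the callee's footprint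
`common_deint`) and `ret_walk` (`cut13` to the loop head `cut14` with `i + 1`, `pcount + 1`, or to `done:` = `cut32`). -/
theorem Vorbis.Spec.Worked.decode_residue_4b_ok : Vorbis.Spec.decode_residue_4b.Statement := by
  intro Lay hLay μ hμ u₀ hcode h_load8 h_deint
  intro g hent pass cs i pcount b v hb hat
  -- 0x10f141 … 0x10f18e, the callee, 0x10f193
  refine (Vorbis.Spec.decode_residue_4b.call_walk hLay hμ hcode h_load8 h_deint hent pass cs i pcount b v hb hat).trans ?_
  intro v1 h13
  -- 0x10f193 … 0x10f1a3 → 0x10f1a7, or 0x10f290 … 0x10f297 → 0x10fa53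
  exact Vorbis.Spec.decode_residue_4b.ret_walk hLay hμ hcode hent pass cs i pcount v1 h13
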